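-- pv_equiv track=rewrite | github.com/nanguer2/Introducci-n-a-la-Programaci-n | Recuperatorios/2da pregunta del RDC6 numeros positivos y negativos.py | construir_arreglo
-- ===== SOURCE A (Python) =====
-- def construir_arreglo(arre_num):
--     # 1. Almacenar POSICIONES de positivos y negativos en el arreglo de entrada
--     # ESTAS LISTAS SON LOCALES y contienen ÍNDICES, no los valores completos
--     indices_pos = [] # Cambio sugerido: Arreglo LOCAL de índices positivos
--     indices_neg = [] # Cambio sugerido: Arreglo LOCAL de índices negativos
--
--     for i in range(len(arre_num)):
--         if arre_num[i] > 0: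
--             indices_pos.append(i)
--         elif arre_num[i] < 0:
--             indices_neg.append(i)
--
--     # 2. Construir el arreglo final (tamaño 6)
--     arreglo_final = []
--
--     # Contadores para saber qué índice tomar de las listas de POSICIONES
--     cp = 0 # Contador para índices positivos
--     cn = 0 # Contador para índices negativos
--
--     i = 0
--     while i < 6:
--         # Posiciones pares (0, 2, 4) -> Necesitan un Positivo
--         if i % 2 == 0:
--             if cp < len(indices_pos):
--                 # Tomar el VALOR del arreglo original (arre_num) usando el índice disponible
--                 valor = arre_num[indices_pos[cp]]
--                 arreglo_final.append(valor)
--                 cp += 1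
--             else:
--                 # Si no hay positivos disponibles, poner cero
--                 arreglo_final.append(0)
--
--         # Posiciones impares (1, 3, 5) -> Necesitan un Negativo
--         else: # i % 2 != 0
--             if cn < len(indices_neg):
--                 # Tomar el VALOR del arreglo original (arre_num) usando el índice disponible
--                 valor = arre_num[indices_neg[cn]]
--                 arreglo_final.append(valor)
--                 cn += 1
--             else:
--                 # Si no hay negativos disponibles, poner cero
--                 arreglo_final.append(0)
--         i += 1
--     return arreglo_final
-- ===== SOURCE B (Python) =====
-- def construir_arreglo(arre_num):
--     # Single pass: place values directly into a preallocated zero array,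
--     # positives at even slots, negatives at odd slots, stop early when full.
--     out = [0] * 6
--     cp = 0
--     cn = 0
--     for x in arre_num:
--         if x > 0 and cp < 3:
--             out[2 * cp] = x
--             cp += 1
--         elif x < 0 and cn < 3:
--             out[2 * cn + 1] = x
--             cn += 1
--         if cp == 3 and cn == 3:
--             break
--     return out
-- ===== Notes on version B (the rewrite author's own statement) =====
-- stated objective: alternative
-- what changed: B makes a single pass over the input, writing each positive into the next free even slot and each negative into the next free odd slot of a preallocated zero-filled size-6 array and exiting early once both are full, instead of A's two staged passes: collecting index lists over the whole input and then a 6-step parity-dispatched loop re-looking values up by index.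
import Mathlib
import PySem

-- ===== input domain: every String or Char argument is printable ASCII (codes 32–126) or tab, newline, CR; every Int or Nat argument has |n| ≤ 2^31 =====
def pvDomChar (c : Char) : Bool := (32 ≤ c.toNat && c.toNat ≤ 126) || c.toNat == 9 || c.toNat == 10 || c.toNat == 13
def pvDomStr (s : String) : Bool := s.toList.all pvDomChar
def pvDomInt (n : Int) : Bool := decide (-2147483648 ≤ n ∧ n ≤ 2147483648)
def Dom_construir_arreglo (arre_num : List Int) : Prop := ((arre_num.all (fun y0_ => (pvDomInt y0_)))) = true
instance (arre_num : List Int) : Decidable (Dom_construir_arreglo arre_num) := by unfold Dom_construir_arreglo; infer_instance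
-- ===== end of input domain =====

-- B makes a single pass writing positives/negatives directly into a preallocated zero-filled
-- size-6 array with early exit, replacing A's staged index-collection + parity loop; objective: alternative.

-- ===== PORT A =====
-- first for-loop of A: collect (indices_pos, indices_neg)
def pvBuildIdx (arre_num : List Int) : List Int × List Int :=
  (PySem.List.pyRange 0 arre_num.length 1).foldl
    (fun st i =>
      if PySem.List.pyGetD arre_num i 0 > 0 then (st.1 ++ [i], st.2)
      else if PySem.List.pyGetD arre_num i 0 < 0 then (st.1, st.2 ++ [i])
      else st)
    ([], [])

-- body of A's while-loop; state (arreglo_final, cp, cn)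
def pvStep (arre_num ip ineg : List Int) (st : List Int × Int × Int) (i : Int) :
    List Int × Int × Int :=
  if i % 2 == 0 then
    if st.2.1 < (ip.length : Int) then
      (st.1 ++ [PySem.List.pyGetD arre_num (PySem.List.pyGetD ip st.2.1 0) 0],
       st.2.1 + 1, st.2.2)
    else (st.1 ++ [0], st.2)
  else
    if st.2.2 < (ineg.length : Int) then
      (st.1 ++ [PySem.List.pyGetD arre_num (PySem.List.pyGetD ineg st.2.2 0) 0],
       st.2.1, st.2.2 + 1)
    else (st.1 ++ [0], st.2)

-- A's while-loop: i = 0..5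
def pvWhile (arre_num ip ineg : List Int) : List Int × Int × Int :=
  (PySem.List.pyRange 0 6 1).foldl (pvStep arre_num ip ineg) ([], 0, 0)

def construir_arreglo (arre_num : List Int) : List Int :=
  let idx := pvBuildIdx arre_num
  (pvWhile arre_num idx.1 idx.2).1

-- ===== PORT B =====
-- B's for-loop with break; counters are Nat (Python counters start at 0 and only increase),
-- so out[2*cp] = x is List.set (2*cp) x, exact on the in-range writes B performs.
def pvAltLoop (xs : List Int) (out : List Int) (cp cn : Nat) : List Int :=
  match xs with
  | [] => out
  | x :: rest =>
    let st :=
      if 0 < x ∧ cp < 3 then (out.set (2 * cp) x, cp + 1, cn)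
      else if x < 0 ∧ cn < 3 then (out.set (2 * cn + 1) x, cp, cn + 1)
      else (out, cp, cn)
    if st.2.1 = 3 ∧ st.2.2 = 3 then st.1
    else pvAltLoop rest st.1 st.2.1 st.2.2

def construir_arreglo_alt (arre_num : List Int) : List Int :=
  pvAltLoop arre_num (List.replicate 6 0) 0 0

-- ===== PRECONDITION & SPEC =====
def Spec_construir_arreglo (arre_num : List Int) (out : List Int) : Prop := out = construir_arreglo_alt arre_num
instance (arre_num : List Int) (out : List Int) : Decidable (Spec_construir_arreglo arre_num out) := by unfold Spec_construir_arreglo; infer_instance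

-- ===== CLAIM =====
def Claim_equal_construir_arreglo : Prop := ∀ (arre_num : List Int), Dom_construir_arreglo arre_num → Spec_construir_arreglo arre_num (construir_arreglo arre_num)

-- ===== LEMMAS AND PROOFS =====

-- The index lists of A's first loop, looked up in arre_num, are exactly the value filters.
theorem pvBuildIdx_spec (arre : List Int) :
    (pvBuildIdx arre).1.map (fun i => PySem.List.pyGetD arre i 0)
        = arre.filter (fun x => decide (0 < x)) ∧
    (pvBuildIdx arre).2.map (fun i => PySem.List.pyGetD arre i 0)
        = arre.filter (fun x => decide (x < 0)) ∧
    (∀ i ∈ (pvBuildIdx arre).1, 0 ≤ i ∧ i < (arre.length : Int)) ∧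
    (∀ i ∈ (pvBuildIdx arre).2, 0 ≤ i ∧ i < (arre.length : Int)) := by
  induction arre using List.reverseRecOn with
  | nil =>
      have h : PySem.List.pyRange 0 (List.length ([] : List Int)) 1 = [] := by decide
      simp [pvBuildIdx]
  | append_singleton ys a ih =>
      obtain ⟨ihp, ihn, ihbp, ihbn⟩ := ih
      have hlook : ∀ i : Int, 0 ≤ i → i < (ys.length : Int) →
          PySem.List.pyGetD (ys ++ [a]) i 0 = PySem.List.pyGetD ys i 0 := by
        intro i h1 h2
        rw [PySem.List.pyGetD_eq_getElem _ _ h1 (by simp; omega),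
            PySem.List.pyGetD_eq_getElem _ _ h1 (by exact_mod_cast h2)]
        exact List.getElem_append_left _
      have hrange : PySem.List.pyRange 0 ((ys ++ [a]).length) 1
          = PySem.List.pyRange 0 ys.length 1 ++ [(ys.length : Int)] := by
        have h : ((ys ++ [a]).length : Int) = (ys.length : Int) + 1 := by simp
        rw [h]
        exact PySem.List.pyRange_one_succ_right (by positivity)
      have hfold : (PySem.List.pyRange 0 (ys.length : Int) 1).foldl
            (fun st i =>
              if PySem.List.pyGetD (ys ++ [a]) i 0 > 0 then (st.1 ++ [i], st.2)
              else if PySem.List.pyGetD (ys ++ [a]) i 0 < 0 then (st.1, st.2 ++ [i])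
              else st) ([], []) = pvBuildIdx ys := by
        unfold pvBuildIdx
        apply PySem.List.foldl_congr_mem
        intro acc x hx
        have hx' := (PySem.List.mem_pyRange_one).1 hx
        rw [hlook x hx'.1 hx'.2]
      have hcong : pvBuildIdx (ys ++ [a])
          = (fun st i =>
              if PySem.List.pyGetD (ys ++ [a]) i 0 > 0 then (st.1 ++ [i], st.2)
              else if PySem.List.pyGetD (ys ++ [a]) i 0 < 0 then (st.1, st.2 ++ [i])
              else st) (pvBuildIdx ys) (ys.length : Int) := by
        conv_lhs => unfold pvBuildIdx
        rw [hrange, List.foldl_append, List.foldl_cons, List.foldl_nil, hfold]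
      have hlast : PySem.List.pyGetD (ys ++ [a]) (ys.length : Int) 0 = a := by
        simp [PySem.List.pyGetD_natCast, List.getD]
      have hbp' : ∀ i ∈ (pvBuildIdx ys).1, 0 ≤ i ∧ i < ((ys ++ [a]).length : Int) := by
        intro i hi; have := ihbp i hi; simp; omega
      have hbn' : ∀ i ∈ (pvBuildIdx ys).2, 0 ≤ i ∧ i < ((ys ++ [a]).length : Int) := by
        intro i hi; have := ihbn i hi; simp; omega
      have hmapp : (pvBuildIdx ys).1.map (fun i => PySem.List.pyGetD (ys ++ [a]) i 0)
          = ys.filter (fun x => decide (0 < x)) := by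
        rw [← ihp]; apply List.map_congr_left
        intro i hi; exact hlook i (ihbp i hi).1 (ihbp i hi).2
      have hmapn : (pvBuildIdx ys).2.map (fun i => PySem.List.pyGetD (ys ++ [a]) i 0)
          = ys.filter (fun x => decide (x < 0)) := by
        rw [← ihn]; apply List.map_congr_left
        intro i hi; exact hlook i (ihbn i hi).1 (ihbn i hi).2
      rw [hcong]
      by_cases hpos : a > 0
      · simp only [hlast, hpos, if_pos]
        refine ⟨?_, ?_, ?_, ?_⟩
        · simp [List.map_append, hmapp, hlast, List.filter_append, hpos]
        · simp [hmapn, List.filter_append, show ¬ a < 0 by omega]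
        · intro i hi
          rcases List.mem_append.1 hi with h | h
          · exact hbp' i h
          · simp at h; subst h; constructor <;> simp
        · exact hbn'
      · by_cases hneg : a < 0
        · simp only [hlast, hpos, hneg, if_pos]
          refine ⟨?_, ?_, ?_, ?_⟩
          · simp [hmapp, List.filter_append, hpos]
          · simp [List.map_append, hmapn, hlast, List.filter_append, hneg]
          · exact hbp'
          · intro i hi
            rcases List.mem_append.1 hi with h | h
            · exact hbn' i h
            · simp at h; subst h; constructor <;> simp
        · simp only [hlast, hpos, hneg]
          refine ⟨?_, ?_, hbp', hbn'⟩
          · simp [hmapp, List.filter_append, hpos]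
          · simp [hmapn, List.filter_append, hneg]

-- A's even (cp) step, with the counter written as min m len.
theorem pvStep_even (arre ip ineg : List Int) (acc : List Int) (m n : Nat) (i : Int)
    (hi : i % 2 = 0) :
    pvStep arre ip ineg (acc, ((min m ip.length : Nat) : Int), ((min n ineg.length : Nat) : Int)) i
      = (acc ++ [(ip.map (fun j => PySem.List.pyGetD arre j 0)).getD m 0],
         ((min (m+1) ip.length : Nat) : Int), ((min n ineg.length : Nat) : Int)) := by
  by_cases h : m < ip.length
  · have h1 : min m ip.length = m := by omega
    have h2 : min (m+1) ip.length = m + 1 := by omega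
    simp [pvStep, hi, h1, h, List.getD, PySem.List.pyGetD_natCast]
  · have h1 : min m ip.length = ip.length := by omega
    have h2 : min (m+1) ip.length = ip.length := by omega
    simp [pvStep, hi, h1, h2, List.getD,
          List.getElem?_eq_none (by omega : ip.length ≤ m)]

-- A's odd (cn) step.
theorem pvStep_odd (arre ip ineg : List Int) (acc : List Int) (m n : Nat) (i : Int)
    (hi : i % 2 = 1) :
    pvStep arre ip ineg (acc, ((min m ip.length : Nat) : Int), ((min n ineg.length : Nat) : Int)) i
      = (acc ++ [(ineg.map (fun j => PySem.List.pyGetD arre j 0)).getD n 0],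
         ((min m ip.length : Nat) : Int), ((min (n+1) ineg.length : Nat) : Int)) := by
  by_cases h : n < ineg.length
  · have h1 : min n ineg.length = n := by omega
    have h2 : min (n+1) ineg.length = n + 1 := by omega
    simp [pvStep, hi, h1, h, List.getD, PySem.List.pyGetD_natCast]
  · have h1 : min n ineg.length = ineg.length := by omega
    have h2 : min (n+1) ineg.length = ineg.length := by omega
    simp [pvStep, hi, h1, h2, List.getD,
          List.getElem?_eq_none (by omega : ineg.length ≤ n)]

-- A's while loop returns the six interleaved lookups, as getD on the mapped index lists.
theorem pvWhile_eval (arre ip ineg : List Int) :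
    (pvWhile arre ip ineg).1 =
      [(ip.map (fun i => PySem.List.pyGetD arre i 0)).getD 0 0,
       (ineg.map (fun i => PySem.List.pyGetD arre i 0)).getD 0 0,
       (ip.map (fun i => PySem.List.pyGetD arre i 0)).getD 1 0,
       (ineg.map (fun i => PySem.List.pyGetD arre i 0)).getD 1 0,
       (ip.map (fun i => PySem.List.pyGetD arre i 0)).getD 2 0,
       (ineg.map (fun i => PySem.List.pyGetD arre i 0)).getD 2 0] := by
  have hr : PySem.List.pyRange 0 6 1 = [0,1,2,3,4,5] := by decide
  have h0 : (([], 0, 0) : List Int × Int × Int)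
      = ([], ((min 0 ip.length : Nat) : Int), ((min 0 ineg.length : Nat) : Int)) := by simp
  unfold pvWhile
  rw [hr]
  simp only [List.foldl_cons, List.foldl_nil]
  rw [h0,
      pvStep_even arre ip ineg _ 0 0 0 (by decide),
      pvStep_odd arre ip ineg _ 1 0 1 (by decide),
      pvStep_even arre ip ineg _ 1 1 2 (by decide),
      pvStep_odd arre ip ineg _ 2 1 3 (by decide),
      pvStep_even arre ip ineg _ 2 2 4 (by decide),
      pvStep_odd arre ip ineg _ 3 2 5 (by decide)]
  simp

-- proof-side characterisation of B's writes: fill even slots from P starting at cp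
def pvWE (out : List Int) (cp : Nat) (P : List Int) : List Int :=
  match P with
  | [] => out
  | p :: P' => if cp < 3 then pvWE (out.set (2 * cp) p) (cp + 1) P' else out

-- fill odd slots from N starting at cn
def pvWO (out : List Int) (cn : Nat) (N : List Int) : List Int :=
  match N with
  | [] => out
  | q :: N' => if cn < 3 then pvWO (out.set (2 * cn + 1) q) (cn + 1) N' else out

theorem pvWE_ge3 (out : List Int) (cp : Nat) (P : List Int) (h : 3 ≤ cp) :
    pvWE out cp P = out := by
  cases P <;> simp [pvWE, show ¬ cp < 3 by omega]

theorem pvWO_ge3 (out : List Int) (cn : Nat) (N : List Int) (h : 3 ≤ cn) :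
    pvWO out cn N = out := by
  cases N <;> simp [pvWO, show ¬ cn < 3 by omega]

-- odd writes commute past an even-slot set
theorem pvWO_set_even (out : List Int) (k cn : Nat) (v : Int) (N : List Int) :
    pvWO (out.set (2 * k) v) cn N = (pvWO out cn N).set (2 * k) v := by
  induction N generalizing out cn with
  | nil => simp [pvWO]
  | cons q N' ih =>
      by_cases h : cn < 3
      · simp only [pvWO, if_pos h]
        rw [List.set_comm _ _ (by omega : 2 * k ≠ 2 * cn + 1), ih]
      · simp [pvWO, h]

-- B's loop equals: write the negative filter into odd slots, then the positive filter into even slots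
theorem pvAltLoop_eq (xs : List Int) (out : List Int) (cp cn : Nat) :
    pvAltLoop xs out cp cn
      = pvWE (pvWO out cn (xs.filter (fun x => decide (x < 0)))) cp
             (xs.filter (fun x => decide (0 < x))) := by
  induction xs generalizing out cp cn with
  | nil => simp [pvAltLoop, pvWE, pvWO]
  | cons x rest ih =>
      by_cases hp : 0 < x ∧ cp < 3
      · have hxn : ¬ x < 0 := by omega
        have hfp : (x :: rest).filter (fun x => decide (0 < x))
            = x :: rest.filter (fun x => decide (0 < x)) := by simp [hp.1]
        have hfn : (x :: rest).filter (fun x => decide (x < 0))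
            = rest.filter (fun x => decide (x < 0)) := by simp [hxn]
        simp only [pvAltLoop, if_pos hp, hfp, hfn]
        rw [show pvWE (pvWO out cn (rest.filter fun x => decide (x < 0))) cp
              (x :: rest.filter fun x => decide (0 < x))
            = pvWE ((pvWO out cn (rest.filter fun x => decide (x < 0))).set (2*cp) x) (cp+1)
              (rest.filter fun x => decide (0 < x)) from by simp [pvWE, hp.2]]
        rw [← pvWO_set_even]
        by_cases hb : cp + 1 = 3 ∧ cn = 3
        · simp only [if_pos hb]
          rw [pvWO_ge3 _ _ _ (by omega), pvWE_ge3 _ _ _ (by omega)]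
        · simp only [if_neg hb]
          exact ih _ _ _
      · by_cases hn : x < 0 ∧ cn < 3
        · have hxp : ¬ 0 < x := by omega
          have hfp : (x :: rest).filter (fun x => decide (0 < x))
              = rest.filter (fun x => decide (0 < x)) := by simp [hxp]
          have hfn : (x :: rest).filter (fun x => decide (x < 0))
              = x :: rest.filter (fun x => decide (x < 0)) := by simp [hn.1]
          simp only [pvAltLoop, if_neg hp, if_pos hn, hfp, hfn]
          rw [show pvWO out cn (x :: rest.filter fun x => decide (x < 0))
              = pvWO (out.set (2*cn+1) x) (cn+1) (rest.filter fun x => decide (x < 0))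
              from by simp [pvWO, hn.2]]
          by_cases hb : cp = 3 ∧ cn + 1 = 3
          · simp only [if_pos hb]
            rw [pvWO_ge3 _ _ _ (by omega), pvWE_ge3 _ _ _ (by omega)]
          · simp only [if_neg hb]; exact ih _ _ _
        · -- neither branch fires: state unchanged, and the head x cannot be written
          have hR : pvWE (pvWO out cn ((x :: rest).filter (fun x => decide (x < 0)))) cp
                ((x :: rest).filter (fun x => decide (0 < x)))
              = pvWE (pvWO out cn (rest.filter (fun x => decide (x < 0)))) cp
                (rest.filter (fun x => decide (0 < x))) := by
            rcases lt_trichotomy x 0 with h | h | h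
            · have hcn : 3 ≤ cn := by by_contra hc; exact hn ⟨h, by omega⟩
              have e1 : (x :: rest).filter (fun x => decide (x < 0))
                  = x :: rest.filter (fun x => decide (x < 0)) := by simp [h]
              have e2 : (x :: rest).filter (fun x => decide (0 < x))
                  = rest.filter (fun x => decide (0 < x)) := by simp [show ¬ 0 < x by omega]
              rw [e1, e2, pvWO_ge3 _ _ _ hcn, pvWO_ge3 _ _ _ hcn]
            · subst h; simp
            · have hcp : 3 ≤ cp := by by_contra hc; exact hp ⟨h, by omega⟩
              have e1 : (x :: rest).filter (fun x => decide (0 < x))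
                  = x :: rest.filter (fun x => decide (0 < x)) := by simp [h]
              have e2 : (x :: rest).filter (fun x => decide (x < 0))
                  = rest.filter (fun x => decide (x < 0)) := by simp [show ¬ x < 0 by omega]
              rw [e1, e2, pvWE_ge3 _ _ _ hcp, pvWE_ge3 _ _ _ hcp]
          simp only [pvAltLoop, if_neg hp, if_neg hn, hR]
          by_cases hb : cp = 3 ∧ cn = 3
          · simp only [if_pos hb]
            rw [pvWO_ge3 _ _ _ (by omega), pvWE_ge3 _ _ _ (by omega)]
          · simp only [if_neg hb]; exact ih _ _ _

-- the final shape: zeros filled from the two filters, as getD positions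
theorem pvAltFinal (P N : List Int) :
    pvWE (pvWO (List.replicate 6 0) 0 N) 0 P
      = [P.getD 0 0, N.getD 0 0, P.getD 1 0, N.getD 1 0, P.getD 2 0, N.getD 2 0] := by
  rcases P with _|⟨a,_|⟨b,_|⟨c,P⟩⟩⟩ <;> rcases N with _|⟨d,_|⟨e,_|⟨f,N⟩⟩⟩ <;>
    simp [pvWE, pvWO, pvWE_ge3, pvWO_ge3, List.getD, List.set]

-- ===== VERDICT =====
theorem construir_arreglo_spec : Claim_equal_construir_arreglo := by
  intro arre _
  unfold Spec_construir_arreglo construir_arreglo construir_arreglo_alt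
  obtain ⟨hp, hn, _, _⟩ := pvBuildIdx_spec arre
  rw [pvWhile_eval, hp, hn, pvAltLoop_eq, pvAltFinal]
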